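-- pv_equiv track=rewrite | github.com/passwordless-OTP/ai-agent-system | scripts/github_projects_analyzer.py | extract_complexity
-- ===== SOURCE A (Python) =====
-- def extract_complexity(labels):
--     """Extract complexity from labels"""
--     if any('complexity-low' in label for label in labels):
--         return 'low'
--     elif any('complexity-medium' in label for label in labels):
--         return 'medium'
--     elif any('complexity-high' in label for label in labels):
--         return 'high'
--     else:
--         return 'unknown'
-- ===== SOURCE B (Python) =====
-- def extract_complexity(labels):
--     """Extract complexity from labels"""
--     low = medium = high = False
--     for label in labels:
--         low = low or ('complexity-low' in label)
--         medium = medium or ('complexity-medium' in label)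
--         high = high or ('complexity-high' in label)
--     if low:
--         return 'low'
--     if medium:
--         return 'medium'
--     if high:
--         return 'high'
--     return 'unknown'
-- ===== Notes on version B (the rewrite author's own statement) =====
-- stated objective: alternative
-- what changed: Replaced three separate short-circuiting any() scans over the label list with a single pass maintaining three boolean flags, followed by a priority decision after the loop.
import Mathlib
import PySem

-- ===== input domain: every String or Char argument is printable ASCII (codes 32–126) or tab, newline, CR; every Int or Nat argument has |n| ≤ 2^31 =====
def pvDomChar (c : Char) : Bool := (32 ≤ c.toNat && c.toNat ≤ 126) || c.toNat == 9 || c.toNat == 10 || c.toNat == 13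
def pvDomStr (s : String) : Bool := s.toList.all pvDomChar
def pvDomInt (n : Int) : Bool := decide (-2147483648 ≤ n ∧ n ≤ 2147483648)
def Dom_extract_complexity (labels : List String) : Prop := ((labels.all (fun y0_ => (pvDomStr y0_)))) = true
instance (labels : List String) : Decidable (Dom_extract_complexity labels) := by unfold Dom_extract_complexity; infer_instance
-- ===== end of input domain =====

-- B replaces A's three short-circuiting any() scans by one pass keeping three flags plus a priority decision (alternative decomposition, same cost).


-- ===== PORT A =====
def extract_complexity (labels : List String) : String :=
  if labels.any (fun label => PySem.Str.isIn "complexity-low" label) then "low"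
  else if labels.any (fun label => PySem.Str.isIn "complexity-medium" label) then "medium"
  else if labels.any (fun label => PySem.Str.isIn "complexity-high" label) then "high"
  else "unknown"

-- ===== PORT B =====
def extract_complexity_alt (labels : List String) : String :=
  let flags := labels.foldl
    (fun (f : Bool × Bool × Bool) label =>
      (f.1 || PySem.Str.isIn "complexity-low" label,
       f.2.1 || PySem.Str.isIn "complexity-medium" label,
       f.2.2 || PySem.Str.isIn "complexity-high" label))
    (false, false, false)
  if flags.1 then "low"
  else if flags.2.1 then "medium"
  else if flags.2.2 then "high"
  else "unknown"

-- ===== PRECONDITION & SPEC =====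
def Spec_extract_complexity (labels : List String) (out : String) : Prop := out = extract_complexity_alt labels
instance (labels : List String) (out : String) : Decidable (Spec_extract_complexity labels out) := by unfold Spec_extract_complexity; infer_instance

-- ===== CLAIM (what is proved, stated in full; the proofs are below) =====
def Claim_equal_extract_complexity : Prop := ∀ (labels : List String), Dom_extract_complexity labels → Spec_extract_complexity labels (extract_complexity labels)

-- ===== LEMMAS AND PROOFS =====
theorem ec_flags (labels : List String) (f : Bool × Bool × Bool) :
    labels.foldl
      (fun (f : Bool × Bool × Bool) label =>
        (f.1 || PySem.Str.isIn "complexity-low" label,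
         f.2.1 || PySem.Str.isIn "complexity-medium" label,
         f.2.2 || PySem.Str.isIn "complexity-high" label)) f
    = (f.1 || labels.any (fun l => PySem.Str.isIn "complexity-low" l),
       f.2.1 || labels.any (fun l => PySem.Str.isIn "complexity-medium" l),
       f.2.2 || labels.any (fun l => PySem.Str.isIn "complexity-high" l)) := by
  induction labels generalizing f with
  | nil => simp
  | cons h t ih => rw [List.foldl_cons, ih]; simp [Bool.or_assoc]

-- ===== VERDICT (by name: the statement is the Claim_ definition above) =====
theorem extract_complexity_spec : Claim_equal_extract_complexity := by
  intro labels _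
  unfold Spec_extract_complexity extract_complexity extract_complexity_alt
  simp only [ec_flags, Bool.false_or]
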